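-- pv_equiv track=rewrite | github.com/jihenkh1/Accessibility_testing_AI | src/accessibility_ai/manual_testing/checklist_generator.py | detect_components_from_report
-- ===== SOURCE A (Python) =====
-- from typing import List, Dict, Any
--
-- def detect_components_from_report(issues: List[Dict[str, Any]]) -> List[str]:
--     """
--     Detect likely components present based on automated scan issues.
--     This is a simple heuristic - looks for common patterns in rule IDs and selectors.
--
--     Args:
--         issues: List of issues from automated scan
--
--     Returns:
--         List of detected component names
--     """
--     detected = set()
--
--     for issue in issues:
--         rule_id = issue.get("rule_id", "").lower()
--         selector = issue.get("selector", "").lower()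
--
--         # Modal detection
--         if "dialog" in rule_id or "modal" in rule_id or "role=\"dialog\"" in selector:
--             detected.add("modal")
--
--         # Dropdown detection
--         if "select" in selector or "dropdown" in rule_id or "combobox" in selector:
--             detected.add("dropdown")
--
--         # Tabs detection
--         if "tab" in rule_id or "tablist" in selector or "role=\"tab\"" in selector:
--             detected.add("tabs")
--
--         # Carousel detection
--         if "carousel" in rule_id or "slider" in rule_id or "slide" in selector:
--             detected.add("carousel")
--
--         # Accordion detection
--         if "accordion" in rule_id or "aria-expanded" in selector:
--             detected.add("accordion")
--
--         # Date picker detection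
--         if "date" in rule_id or "datepicker" in selector or "calendar" in selector:
--             detected.add("datepicker")
--
--         # Menu detection
--         if "menu" in rule_id or "navigation" in rule_id or "nav" in selector:
--             detected.add("menu")
--
--         # Search detection
--         if "search" in rule_id or "search" in selector:
--             detected.add("search")
--
--         # Pagination detection
--         if "pagination" in rule_id or "pager" in selector:
--             detected.add("pagination")
--
--         # Tooltip detection
--         if "tooltip" in rule_id or "title" in rule_id:
--             detected.add("tooltip")
--
--     return sorted(list(detected))
-- ===== SOURCE B (Python) =====
-- _RULES = [
--     ("accordion", [("rule_id", "accordion"), ("selector", "aria-expanded")]),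
--     ("carousel", [("rule_id", "carousel"), ("rule_id", "slider"), ("selector", "slide")]),
--     ("datepicker", [("rule_id", "date"), ("selector", "datepicker"), ("selector", "calendar")]),
--     ("dropdown", [("selector", "select"), ("rule_id", "dropdown"), ("selector", "combobox")]),
--     ("menu", [("rule_id", "menu"), ("rule_id", "navigation"), ("selector", "nav")]),
--     ("modal", [("rule_id", "dialog"), ("rule_id", "modal"), ("selector", 'role="dialog"')]),
--     ("pagination", [("rule_id", "pagination"), ("selector", "pager")]),
--     ("search", [("rule_id", "search"), ("selector", "search")]),
--     ("tabs", [("rule_id", "tab"), ("selector", "tablist"), ("selector", 'role="tab"')]),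
--     ("tooltip", [("rule_id", "tooltip"), ("rule_id", "title")]),
-- ]
--
--
-- def detect_components_from_report(issues):
--     fields = [
--         {"rule_id": issue.get("rule_id", "").lower(),
--          "selector": issue.get("selector", "").lower()}
--         for issue in issues
--     ]
--     return [name for name, patterns in _RULES
--             if any(any(pat in flds[field] for field, pat in patterns)
--                    for flds in fields)]
-- ===== Notes on version B (the rewrite author's own statement) =====
-- stated objective: simpler
-- what changed: Replaced A's ten hand-written per-issue if-chains accumulating a set (then sorted) by a declarative rules table (component -> (field, substring) patterns) scanned with filter/any, emitting the result directly in alphabetical order with no set and no sort.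
import Mathlib
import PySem

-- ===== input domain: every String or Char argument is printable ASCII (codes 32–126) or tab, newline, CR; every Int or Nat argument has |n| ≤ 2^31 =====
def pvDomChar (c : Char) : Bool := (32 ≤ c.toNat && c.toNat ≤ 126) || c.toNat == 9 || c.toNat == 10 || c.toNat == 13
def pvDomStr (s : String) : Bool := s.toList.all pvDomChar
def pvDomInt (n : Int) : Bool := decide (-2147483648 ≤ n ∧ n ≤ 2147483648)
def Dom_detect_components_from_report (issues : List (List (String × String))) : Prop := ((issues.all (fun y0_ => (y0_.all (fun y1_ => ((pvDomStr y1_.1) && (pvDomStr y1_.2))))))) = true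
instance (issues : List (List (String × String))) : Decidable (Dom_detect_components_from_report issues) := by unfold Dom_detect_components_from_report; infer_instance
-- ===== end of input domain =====

-- B replaces A's fixed block of ten hand-written if-chains (one per component, executed per issue)
-- by a declarative rules table (component ↦ list of (field, substring) patterns) scanned with any/filter;
-- objective: simpler/data-driven, same asymptotic cost.

-- ===== PORT A =====
def detect_components_from_report (issues : List (List (String × String))) : List String :=
  let detected : PySem.Set String :=
    issues.foldl (fun detected issue =>
      let rule_id := PySem.Str.lower ((PySem.Dict.mk issue).getD "rule_id" "")
      let selector := PySem.Str.lower ((PySem.Dict.mk issue).getD "selector" "")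
      let d := if PySem.Str.isIn "dialog" rule_id || PySem.Str.isIn "modal" rule_id || PySem.Str.isIn "role=\"dialog\"" selector then detected.add "modal" else detected
      let d := if PySem.Str.isIn "select" selector || PySem.Str.isIn "dropdown" rule_id || PySem.Str.isIn "combobox" selector then d.add "dropdown" else d
      let d := if PySem.Str.isIn "tab" rule_id || PySem.Str.isIn "tablist" selector || PySem.Str.isIn "role=\"tab\"" selector then d.add "tabs" else d
      let d := if PySem.Str.isIn "carousel" rule_id || PySem.Str.isIn "slider" rule_id || PySem.Str.isIn "slide" selector then d.add "carousel" else d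
      let d := if PySem.Str.isIn "accordion" rule_id || PySem.Str.isIn "aria-expanded" selector then d.add "accordion" else d
      let d := if PySem.Str.isIn "date" rule_id || PySem.Str.isIn "datepicker" selector || PySem.Str.isIn "calendar" selector then d.add "datepicker" else d
      let d := if PySem.Str.isIn "menu" rule_id || PySem.Str.isIn "navigation" rule_id || PySem.Str.isIn "nav" selector then d.add "menu" else d
      let d := if PySem.Str.isIn "search" rule_id || PySem.Str.isIn "search" selector then d.add "search" else d
      let d := if PySem.Str.isIn "pagination" rule_id || PySem.Str.isIn "pager" selector then d.add "pagination" else d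
      let d := if PySem.Str.isIn "tooltip" rule_id || PySem.Str.isIn "title" rule_id then d.add "tooltip" else d
      d) PySem.Set.empty
  PySem.List.sorted detected (fun x => x) false

-- ===== PORT B =====
def pvRules : List (String × List (String × String)) :=
  [ ("accordion", [("rule_id", "accordion"), ("selector", "aria-expanded")]),
    ("carousel", [("rule_id", "carousel"), ("rule_id", "slider"), ("selector", "slide")]),
    ("datepicker", [("rule_id", "date"), ("selector", "datepicker"), ("selector", "calendar")]),
    ("dropdown", [("selector", "select"), ("rule_id", "dropdown"), ("selector", "combobox")]),
    ("menu", [("rule_id", "menu"), ("rule_id", "navigation"), ("selector", "nav")]),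
    ("modal", [("rule_id", "dialog"), ("rule_id", "modal"), ("selector", "role=\"dialog\"")]),
    ("pagination", [("rule_id", "pagination"), ("selector", "pager")]),
    ("search", [("rule_id", "search"), ("selector", "search")]),
    ("tabs", [("rule_id", "tab"), ("selector", "tablist"), ("selector", "role=\"tab\"")]),
    ("tooltip", [("rule_id", "tooltip"), ("rule_id", "title")]) ]

def detect_components_from_report_alt (issues : List (List (String × String))) : List String :=
  let fields : List (PySem.Dict String String) :=
    issues.map (fun issue =>
      (PySem.Dict.empty.insert "rule_id" (PySem.Str.lower ((PySem.Dict.mk issue).getD "rule_id" ""))).insert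
        "selector" (PySem.Str.lower ((PySem.Dict.mk issue).getD "selector" "")))
  (pvRules.filter (fun r =>
      fields.any (fun flds => r.2.any (fun p => PySem.Str.isIn p.2 (flds.getD p.1 ""))))).map (fun r => r.1)

-- ===== PRECONDITION & SPEC =====
def Spec_detect_components_from_report (issues : List (List (String × String))) (out : List String) : Prop := out = detect_components_from_report_alt issues
instance (issues : List (List (String × String))) (out : List String) : Decidable (Spec_detect_components_from_report issues out) := by unfold Spec_detect_components_from_report; infer_instance

-- ===== CLAIM (what is proved, stated in full; the proofs are below) =====
def Claim_equal_detect_components_from_report : Prop := ∀ (issues : List (List (String × String))), Dom_detect_components_from_report issues → Spec_detect_components_from_report issues (detect_components_from_report issues)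

-- ===== LEMMAS AND PROOFS =====

-- A's per-issue loop body, named for the proofs (definitionally the foldl body of the port of A)
def pvStep (detected : PySem.Set String) (issue : List (String × String)) : PySem.Set String :=
  let rule_id := PySem.Str.lower ((PySem.Dict.mk issue).getD "rule_id" "")
  let selector := PySem.Str.lower ((PySem.Dict.mk issue).getD "selector" "")
  let d := if PySem.Str.isIn "dialog" rule_id || PySem.Str.isIn "modal" rule_id || PySem.Str.isIn "role=\"dialog\"" selector then detected.add "modal" else detected
  let d := if PySem.Str.isIn "select" selector || PySem.Str.isIn "dropdown" rule_id || PySem.Str.isIn "combobox" selector then d.add "dropdown" else d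
  let d := if PySem.Str.isIn "tab" rule_id || PySem.Str.isIn "tablist" selector || PySem.Str.isIn "role=\"tab\"" selector then d.add "tabs" else d
  let d := if PySem.Str.isIn "carousel" rule_id || PySem.Str.isIn "slider" rule_id || PySem.Str.isIn "slide" selector then d.add "carousel" else d
  let d := if PySem.Str.isIn "accordion" rule_id || PySem.Str.isIn "aria-expanded" selector then d.add "accordion" else d
  let d := if PySem.Str.isIn "date" rule_id || PySem.Str.isIn "datepicker" selector || PySem.Str.isIn "calendar" selector then d.add "datepicker" else d
  let d := if PySem.Str.isIn "menu" rule_id || PySem.Str.isIn "navigation" rule_id || PySem.Str.isIn "nav" selector then d.add "menu" else d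
  let d := if PySem.Str.isIn "search" rule_id || PySem.Str.isIn "search" selector then d.add "search" else d
  let d := if PySem.Str.isIn "pagination" rule_id || PySem.Str.isIn "pager" selector then d.add "pagination" else d
  let d := if PySem.Str.isIn "tooltip" rule_id || PySem.Str.isIn "title" rule_id then d.add "tooltip" else d
  d

-- B's per-issue test for one rule, on the raw issue
def pvTest (issue : List (String × String)) (r : String × List (String × String)) : Bool :=
  r.2.any (fun p => PySem.Str.isIn p.2
    (((PySem.Dict.empty.insert "rule_id" (PySem.Str.lower ((PySem.Dict.mk issue).getD "rule_id" ""))).insert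
        "selector" (PySem.Str.lower ((PySem.Dict.mk issue).getD "selector" ""))).getD p.1 ""))

lemma detect_eq_sorted_foldl (issues : List (List (String × String))) :
    detect_components_from_report issues =
      PySem.List.sorted (issues.foldl pvStep PySem.Set.empty) (fun x => x) false := rfl

lemma alt_eq_filter (issues : List (List (String × String))) :
    detect_components_from_report_alt issues =
      (pvRules.filter (fun r => issues.any (fun issue => pvTest issue r))).map (fun r => r.1) := by
  simp only [detect_components_from_report_alt, List.any_map, pvTest, Function.comp_def]

lemma mem_ite_add (d : PySem.Set String) (b : Bool) (n c : String) :
    c ∈ (if b then d.add n else d) ↔ c ∈ d ∨ (b = true ∧ c = n) := by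
  cases b <;> simp [PySem.Set.mem_add]

lemma nodup_ite_add (d : PySem.Set String) (b : Bool) (n : String) (h : d.Nodup) :
    (if b then d.add n else d).Nodup := by
  cases b
  · simpa using h
  · simpa using PySem.Set.nodup_add d n h

set_option maxHeartbeats 2000000 in
lemma mem_pvStep (S : PySem.Set String) (issue : List (String × String)) (c : String) :
    c ∈ pvStep S issue ↔ c ∈ S ∨ ∃ r ∈ pvRules, r.1 = c ∧ pvTest issue r = true := by
  simp only [pvStep, mem_ite_add]
  simp only [pvRules, pvTest, List.mem_cons, List.not_mem_nil, or_false, exists_eq_or_imp,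
    exists_eq_left, List.any_cons, List.any_nil, PySem.Dict.getD_insert, Bool.or_eq_true,
    Bool.false_eq_true, reduceIte, if_true, String.reduceEq, or_assoc]
  constructor
  · rintro (h | ⟨hc, rfl⟩ | ⟨hc, rfl⟩ | ⟨hc, rfl⟩ | ⟨hc, rfl⟩ | ⟨hc, rfl⟩ | ⟨hc, rfl⟩ | ⟨hc, rfl⟩ | ⟨hc, rfl⟩ | ⟨hc, rfl⟩ | ⟨hc, rfl⟩)
    · exact Or.inl h
    · exact Or.inr (Or.inr (Or.inr (Or.inr (Or.inr (Or.inr (Or.inl (⟨rfl, hc⟩)))))))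
    · exact Or.inr (Or.inr (Or.inr (Or.inr (Or.inl (⟨rfl, hc⟩)))))
    · exact Or.inr (Or.inr (Or.inr (Or.inr (Or.inr (Or.inr (Or.inr (Or.inr (Or.inr (Or.inl (⟨rfl, hc⟩))))))))))
    · exact Or.inr (Or.inr (Or.inl (⟨rfl, hc⟩)))
    · exact Or.inr (Or.inl (⟨rfl, hc⟩))
    · exact Or.inr (Or.inr (Or.inr (Or.inl (⟨rfl, hc⟩))))
    · exact Or.inr (Or.inr (Or.inr (Or.inr (Or.inr (Or.inl (⟨rfl, hc⟩))))))
    · exact Or.inr (Or.inr (Or.inr (Or.inr (Or.inr (Or.inr (Or.inr (Or.inr (Or.inl (⟨rfl, hc⟩)))))))))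
    · exact Or.inr (Or.inr (Or.inr (Or.inr (Or.inr (Or.inr (Or.inr (Or.inl (⟨rfl, hc⟩))))))))
    · exact Or.inr (Or.inr (Or.inr (Or.inr (Or.inr (Or.inr (Or.inr (Or.inr (Or.inr (Or.inr (⟨rfl, hc⟩))))))))))
  · rintro (h | ⟨rfl, hc⟩ | ⟨rfl, hc⟩ | ⟨rfl, hc⟩ | ⟨rfl, hc⟩ | ⟨rfl, hc⟩ | ⟨rfl, hc⟩ | ⟨rfl, hc⟩ | ⟨rfl, hc⟩ | ⟨rfl, hc⟩ | ⟨rfl, hc⟩)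
    · exact Or.inl h
    · exact Or.inr (Or.inr (Or.inr (Or.inr (Or.inr (Or.inl (⟨hc, rfl⟩))))))
    · exact Or.inr (Or.inr (Or.inr (Or.inr (Or.inl (⟨hc, rfl⟩)))))
    · exact Or.inr (Or.inr (Or.inr (Or.inr (Or.inr (Or.inr (Or.inl (⟨hc, rfl⟩)))))))
    · exact Or.inr (Or.inr (Or.inl (⟨hc, rfl⟩)))
    · exact Or.inr (Or.inr (Or.inr (Or.inr (Or.inr (Or.inr (Or.inr (Or.inl (⟨hc, rfl⟩))))))))
    · exact Or.inr (Or.inl (⟨hc, rfl⟩))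
    · exact Or.inr (Or.inr (Or.inr (Or.inr (Or.inr (Or.inr (Or.inr (Or.inr (Or.inr (Or.inl (⟨hc, rfl⟩))))))))))
    · exact Or.inr (Or.inr (Or.inr (Or.inr (Or.inr (Or.inr (Or.inr (Or.inr (Or.inl (⟨hc, rfl⟩)))))))))
    · exact Or.inr (Or.inr (Or.inr (Or.inl (⟨hc, rfl⟩))))
    · exact Or.inr (Or.inr (Or.inr (Or.inr (Or.inr (Or.inr (Or.inr (Or.inr (Or.inr (Or.inr (⟨hc, rfl⟩))))))))))

lemma nodup_pvStep (S : PySem.Set String) (issue : List (String × String)) (h : S.Nodup) :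
    (pvStep S issue).Nodup := by
  simp only [pvStep]
  repeat' apply nodup_ite_add
  exact h

lemma nodup_foldl_pvStep (issues : List (List (String × String))) :
    ∀ (S : PySem.Set String), S.Nodup → (issues.foldl pvStep S).Nodup := by
  induction issues with
  | nil => intro S h; simpa using h
  | cons i is ih => intro S h; exact ih _ (nodup_pvStep S i h)

lemma mem_foldl_pvStep (issues : List (List (String × String))) :
    ∀ (S : PySem.Set String) (c : String),
      c ∈ issues.foldl pvStep S ↔
        c ∈ S ∨ ∃ issue ∈ issues, ∃ r ∈ pvRules, r.1 = c ∧ pvTest issue r = true := by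
  induction issues with
  | nil => simp
  | cons i is ih =>
    intro S c
    simp only [List.foldl_cons, ih, mem_pvStep, List.mem_cons]
    constructor
    · rintro (((h | ⟨r, hr, hc, ht⟩) | ⟨j, hj, r, hr, hc, ht⟩))
      · exact Or.inl h
      · exact Or.inr ⟨i, Or.inl rfl, r, hr, hc, ht⟩
      · exact Or.inr ⟨j, Or.inr hj, r, hr, hc, ht⟩
    · rintro (h | ⟨j, (rfl | hj), r, hr, hc, ht⟩)
      · exact Or.inl (Or.inl h)
      · exact Or.inl (Or.inr ⟨r, hr, hc, ht⟩)
      · exact Or.inr ⟨j, hj, r, hr, hc, ht⟩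

lemma str_lt_of_lex (a b : String) (h : List.Lex (· < ·) a.toList b.toList) : a < b := by
  rw [String.lt_iff_toList_lt]; exact h

lemma names_pairwise_lt : (pvRules.map (fun r => r.1)).Pairwise (· < ·) := by
  simp only [pvRules, List.map_cons, List.map_nil]
  refine List.Pairwise.cons ?_ (List.Pairwise.cons ?_ (List.Pairwise.cons ?_ (List.Pairwise.cons ?_ (List.Pairwise.cons ?_ (List.Pairwise.cons ?_ (List.Pairwise.cons ?_ (List.Pairwise.cons ?_ (List.Pairwise.cons ?_ (List.Pairwise.cons ?_ List.Pairwise.nil)))))))))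
  all_goals (intro b hb; fin_cases hb <;> exact str_lt_of_lex _ _ (by decide))

lemma alt_sublist (issues : List (List (String × String))) :
    (detect_components_from_report_alt issues).Sublist (pvRules.map (fun r => r.1)) := by
  rw [alt_eq_filter]
  exact List.filter_sublist.map _

lemma alt_pairwise_lt (issues : List (List (String × String))) :
    (detect_components_from_report_alt issues).Pairwise (· < ·) :=
  names_pairwise_lt.sublist (alt_sublist issues)

lemma alt_nodup (issues : List (List (String × String))) :
    (detect_components_from_report_alt issues).Nodup :=
  (alt_pairwise_lt issues).imp (fun h => ne_of_lt h)

lemma mem_alt (issues : List (List (String × String))) (c : String) :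
    c ∈ detect_components_from_report_alt issues ↔
      ∃ r ∈ pvRules, r.1 = c ∧ ∃ issue ∈ issues, pvTest issue r = true := by
  rw [alt_eq_filter]
  simp only [List.mem_map, List.mem_filter, List.any_eq_true]
  constructor
  · rintro ⟨r, ⟨hr, ⟨j, hj, ht⟩⟩, rfl⟩
    exact ⟨r, hr, rfl, j, hj, ht⟩
  · rintro ⟨r, hr, rfl, j, hj, ht⟩
    exact ⟨r, ⟨hr, ⟨j, hj, ht⟩⟩, rfl⟩

lemma alt_perm_detected (issues : List (List (String × String))) :
    (detect_components_from_report_alt issues).Perm (issues.foldl pvStep PySem.Set.empty) := by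
  rw [List.perm_ext_iff_of_nodup (alt_nodup issues)
    (nodup_foldl_pvStep issues PySem.Set.empty (by simp [PySem.Set.empty]))]
  intro c
  rw [mem_alt, mem_foldl_pvStep]
  simp only [PySem.Set.empty]
  constructor
  · rintro ⟨r, hr, hc, j, hj, ht⟩
    exact Or.inr ⟨j, hj, r, hr, hc, ht⟩
  · rintro (h | ⟨j, hj, r, hr, hc, ht⟩)
    · simp at h
    · exact ⟨r, hr, hc, j, hj, ht⟩

-- ===== VERDICT (by name: the statement is the Claim_ definition above) =====
theorem detect_components_from_report_spec : Claim_equal_detect_components_from_report := by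
  intro issues _
  unfold Spec_detect_components_from_report
  rw [detect_eq_sorted_foldl]
  exact PySem.List.sorted_eq_of_perm_of_pairwise_lt _ _ _ (alt_perm_detected issues)
    (alt_pairwise_lt issues)
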